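-- pv_equiv track=rewrite | github.com/VaishnaviSidral/Biometrics-Attendance | backend/services/time_calculator.py | aggregate_compliance_statuses
-- ===== SOURCE A (Python) =====
-- from typing import List, Dict, Tuple, Optional
--
-- def aggregate_compliance_statuses(daily_statuses: List[str]) -> str:
--     """
--     Pure aggregation of a list of compliance status strings.
--     Leave days are excluded from compliance calculations.
--
--     Used internally by the weekly/monthly functions below.
--     """
--     if not daily_statuses:
--         return "Non-Compliance"
--
--     # Filter out leave days for compliance calculation
--     working_days_statuses = [status for status in daily_statuses if status != "Leave"]
--
--     if not working_days_statuses: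
--         # All days are leave, return Compliance by default
--         return "Compliance"
--
--     if "Non-Compliance" in working_days_statuses:
--         return "Non-Compliance"
--     elif "Mid-Compliance" in working_days_statuses:
--         return "Mid-Compliance"
--     else:
--         return "Compliance"
-- ===== SOURCE B (Python) =====
-- _SEVERITY = {"Non-Compliance": 2, "Mid-Compliance": 1}
-- _RESULT = {2: "Non-Compliance", 1: "Mid-Compliance", 0: "Compliance"}
--
-- def aggregate_compliance_statuses(daily_statuses):
--     if not daily_statuses:
--         return "Non-Compliance"
--     # Worst (numeric) severity among non-leave days; an all-leave week has
--     # worst 0, which decodes to "Compliance" as desired.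
--     worst = max((_SEVERITY.get(s, 0) for s in daily_statuses if s != "Leave"),
--                 default=0)
--     return _RESULT[worst]
-- ===== Notes on version B (the rewrite author's own statement) =====
-- stated objective: alternative
-- what changed: Replaced A's filtered list plus the priority-ordered chain of membership scans with a rank table: each status maps to a numeric severity, a single max-reduction finds the worst severity, and a reverse table decodes it to the result string.
import Mathlib
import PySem

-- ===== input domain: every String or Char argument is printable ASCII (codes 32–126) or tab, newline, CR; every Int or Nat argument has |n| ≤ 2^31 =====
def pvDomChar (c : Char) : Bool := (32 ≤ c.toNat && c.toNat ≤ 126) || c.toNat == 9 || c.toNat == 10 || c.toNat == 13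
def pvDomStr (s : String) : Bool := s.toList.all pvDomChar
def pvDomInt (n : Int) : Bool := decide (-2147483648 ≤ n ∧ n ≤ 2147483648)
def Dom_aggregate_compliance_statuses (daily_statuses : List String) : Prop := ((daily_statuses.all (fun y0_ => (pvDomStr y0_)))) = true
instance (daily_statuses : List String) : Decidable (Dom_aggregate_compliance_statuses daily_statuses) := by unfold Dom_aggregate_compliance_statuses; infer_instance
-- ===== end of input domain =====

-- B replaces A's priority-ordered membership scans with a numeric severity rank table,
-- a single max-reduction, and a reverse decode table (alternative decomposition, same value).

-- ===== PORT A =====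
def aggregate_compliance_statuses (daily_statuses : List String) : String :=
  if daily_statuses = [] then "Non-Compliance"
  else
    let working_days_statuses := daily_statuses.filter (fun status => status != "Leave")
    if working_days_statuses = [] then "Compliance"
    else if working_days_statuses.contains "Non-Compliance" then "Non-Compliance"
    else if working_days_statuses.contains "Mid-Compliance" then "Mid-Compliance"
    else "Compliance"

-- ===== PORT B =====
-- _SEVERITY.get(s, 0): two-entry dict literal lookup with default, ported as an if-chain (exact)
def pvSeverity (s : String) : Int :=
  if s == "Non-Compliance" then 2 else if s == "Mid-Compliance" then 1 else 0

-- _RESULT[worst]: three-entry dict literal lookup, ported as an if-chain (exact on the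
-- values worst actually takes, which are 0, 1 and 2)
def pvResult (w : Int) : String :=
  if w == 2 then "Non-Compliance" else if w == 1 then "Mid-Compliance" else "Compliance"

def aggregate_compliance_statuses_alt (daily_statuses : List String) : String :=
  if daily_statuses = [] then "Non-Compliance"
  else
    -- max(generator, default=0): severities are ≥ 0, so this is a fold of max from 0
    let worst := ((daily_statuses.filter (fun s => s != "Leave")).map pvSeverity).foldl max 0
    pvResult worst

-- ===== PRECONDITION & SPEC =====
def Spec_aggregate_compliance_statuses (daily_statuses : List String) (out : String) : Prop := out = aggregate_compliance_statuses_alt daily_statuses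
instance (daily_statuses : List String) (out : String) : Decidable (Spec_aggregate_compliance_statuses daily_statuses out) := by unfold Spec_aggregate_compliance_statuses; infer_instance

-- ===== CLAIM (what is proved, stated in full; the proofs are below) =====
def Claim_equal_aggregate_compliance_statuses : Prop := ∀ (daily_statuses : List String), Dom_aggregate_compliance_statuses daily_statuses → Spec_aggregate_compliance_statuses daily_statuses (aggregate_compliance_statuses daily_statuses)

-- ===== LEMMAS AND PROOFS =====
-- ===== VERDICT (by name: the statement is the Claim_ definition above) =====
theorem pvFoldMax_eq (xs : List String) (a : Int) (ha : 0 ≤ a) :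
    (xs.map pvSeverity).foldl max a =
      max a (if xs.contains "Non-Compliance" then 2
             else if xs.contains "Mid-Compliance" then 1 else 0) := by
  induction xs generalizing a with
  | nil => simp; omega
  | cons s t ih =>
    simp only [List.map_cons, List.foldl_cons, List.contains_cons]
    by_cases h1 : s = "Non-Compliance"
    · subst h1
      rw [ih (max a (pvSeverity "Non-Compliance")) (le_trans ha (le_max_left _ _))]
      simp [pvSeverity]
      split_ifs <;> omega
    · by_cases h2 : s = "Mid-Compliance"
      · subst h2
        rw [ih (max a (pvSeverity "Mid-Compliance")) (le_trans ha (le_max_left _ _))]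
        have e1 : ("Non-Compliance" == "Mid-Compliance") = false := by decide
        simp [pvSeverity, e1]
        split_ifs <;> omega
      · have hs : pvSeverity s = 0 := by
          simp [pvSeverity, h1, h2]
        have e1 : ("Non-Compliance" == s) = false := by
          simp only [beq_eq_false_iff_ne]; exact Ne.symm h1
        have e2 : ("Mid-Compliance" == s) = false := by
          simp only [beq_eq_false_iff_ne]; exact Ne.symm h2
        rw [ih (max a (pvSeverity s)) (le_trans ha (le_max_left _ _))]
        simp [hs, e1, e2, max_eq_left ha]

-- ===== VERDICT (by name: the statement is the Claim_ definition above) =====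
theorem aggregate_compliance_statuses_spec : Claim_equal_aggregate_compliance_statuses := by
  intro l _
  unfold Spec_aggregate_compliance_statuses aggregate_compliance_statuses aggregate_compliance_statuses_alt
  by_cases hnil : l = []
  · simp [hnil]
  · simp only [hnil, if_false]
    rw [pvFoldMax_eq _ 0 le_rfl]
    set xs := l.filter (fun s => s != "Leave") with hxs
    by_cases h1 : "Non-Compliance" ∈ xs
    · have hne : xs ≠ [] := List.ne_nil_of_mem h1
      simp [hne, h1, pvResult]
    · by_cases h2 : "Mid-Compliance" ∈ xs
      · have hne : xs ≠ [] := List.ne_nil_of_mem h2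
        simp [hne, h1, h2, pvResult]
      · by_cases hne : xs = []
        · simp [hne, pvResult]
        · simp [hne, h1, h2, pvResult]
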